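-- pv_equiv track=rewrite | github.com/kiteday/Algorithm | week28/직업군 추천하기_hyeinlee725.py | solution
-- ===== SOURCE A (Python) =====
-- def solution(table, languages, preference):
--     score = [] # 직업군 언어 점수 저장 list
--     # table을 이차원 list로 변경
--     new_table = [table[t].split() for t in range(len(table))]
--     for i in range(len(new_table)):
--         total = 0 # total 점수
--         # zip : language와 perference를 묶어줌
--         for lan, pref in zip(languages, preference):
--             if (lan in new_table[i]):
--                 # 언어 선호도 * 직업군 언어 점수
--                 total += pref * (len(new_table[0]) - new_table[i].index(lan))
--         score.append(total) # 점수 저장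
--     job = [] # 직업군 저장 배열
--     max_score = max(score) # 가장 선호하는 언어
--     for i in range(len(score)):
--         if (score[i] == max_score):
--             job.append(new_table[i][0])
--     job.sort() # 총합이 같은 직업군일 경우, 사전순으로 가장 빠른 직업군
--     return job[0]
-- ===== SOURCE B (Python) =====
-- def solution(table, languages, preference):
--     # preference weight per language, built once (duplicate languages accumulate)
--     pref_sum = {}
--     for lan, pref in zip(languages, preference):
--         pref_sum[lan] = pref_sum.get(lan, 0) + pref
--     rows = [entry.split() for entry in table]
--     n = len(rows[0])
--     best = None  # (best_total, best_name)
--     for row in rows: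
--         # one scan of the row: score first occurrences via the dict,
--         # no per-language membership/index scans
--         total = 0
--         seen = set()
--         for j, tok in enumerate(row):
--             if tok not in seen:
--                 seen.add(tok)
--                 total += pref_sum.get(tok, 0) * (n - j)
--         name = row[0]
--         if best is None or total > best[0] or (total == best[0] and name < best[1]):
--             best = (total, name)
--     return best[1]
-- ===== Notes on version B (the rewrite author's own statement) =====
-- stated objective: faster
-- what changed: B builds a language->preference dict once and scores each row by a single scan of its tokens with a seen-set (the per-language 'in row' membership and row.index scans disappear, O(l+r*c) instead of O(r*l*c)), and reduces rows in one pass to the best (total, name) pair instead of A's score list + max + filter pass + sort.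
-- outside the precondition, e.g. on solution(['a x', '  '], ['x'], [2]): A returns 'a', B raises IndexError
import Mathlib
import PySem

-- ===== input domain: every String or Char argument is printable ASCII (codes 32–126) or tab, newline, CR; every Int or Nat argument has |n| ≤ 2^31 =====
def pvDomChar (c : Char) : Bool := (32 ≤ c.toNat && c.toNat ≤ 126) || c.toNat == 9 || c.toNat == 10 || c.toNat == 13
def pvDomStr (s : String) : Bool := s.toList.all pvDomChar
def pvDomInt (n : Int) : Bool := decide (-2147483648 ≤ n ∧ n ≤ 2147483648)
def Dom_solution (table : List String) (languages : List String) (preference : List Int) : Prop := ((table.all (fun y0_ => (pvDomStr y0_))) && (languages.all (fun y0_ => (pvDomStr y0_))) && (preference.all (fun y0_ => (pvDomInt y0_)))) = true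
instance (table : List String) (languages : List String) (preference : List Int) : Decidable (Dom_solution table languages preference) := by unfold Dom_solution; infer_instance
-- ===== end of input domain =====

-- B builds a preference dict once and scores each row by a single scan over its tokens
-- (no per-language membership/index scans), keeping only the best (total, name) pair
-- instead of A's score list + max + filter + sort (objective: faster, measured by the check).


-- ===== PORT A =====
def solution (table : List String) (languages : List String) (preference : List Int) : String :=
  -- new_table = [table[t].split() for t in range(len(table))]
  let new_table := (PySem.List.pyRange 0 (table.length : Int) 1).map
    (fun t => PySem.Str.split₀ (PySem.List.pyGetD table t ""))
  -- score loop
  let score := (PySem.List.pyRange 0 (new_table.length : Int) 1).foldl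
    (fun sc i =>
      let row := PySem.List.pyGetD new_table i []
      let total := (languages.zip preference).foldl
        (fun tot lp =>
          if lp.1 ∈ row then
            tot + lp.2 * (((PySem.List.pyGetD new_table 0 []).length : Int)
                           - (((PySem.List.index? row lp.1).getD 0 : Nat) : Int))
          else tot) 0
      sc ++ [total]) []
  -- max_score = max(score)   (score = [] only when table = [], excluded by Pre_)
  let max_score := (PySem.List.max? score (fun x => x)).getD 0
  -- job loop
  let job := (PySem.List.pyRange 0 (score.length : Int) 1).foldl
    (fun j i =>
      if PySem.List.pyGetD score i 0 = max_score then
        j ++ [PySem.List.pyGetD (PySem.List.pyGetD new_table i []) 0 ""]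
      else j) []
  -- job.sort(); return job[0]
  PySem.List.pyGetD (PySem.List.sorted job (fun x => x) false) 0 ""

-- ===== PORT B =====
def solution_alt (table : List String) (languages : List String) (preference : List Int) : String :=
  -- pref_sum built once from zip(languages, preference)
  let pref_sum := (languages.zip preference).foldl
    (fun d lp => d.insert lp.1 (d.getD lp.1 0 + lp.2)) (PySem.Dict.empty : PySem.Dict String Int)
  let rows := table.map PySem.Str.split₀
  let n : Int := ((rows.headD []).length : Int)   -- len(rows[0]); rows = [] is outside Pre_
  let best := rows.foldl
    (fun best row =>
      -- one scan of the row with a seen-set: score first occurrences via the dict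
      let total := ((PySem.List.enumerate row 0).foldl
        (fun (st : PySem.Set String × Int) p =>
          if p.2 ∈ st.1 then st
          else (PySem.Set.add st.1 p.2, st.2 + pref_sum.getD p.2 0 * (n - p.1)))
        (PySem.Set.ofList ([] : List String), 0)).2
      let name := row.headD ""   -- row[0]; empty rows are outside Pre_
      match best with
      | none => some (total, name)
      | some (bt, bn) =>
          if total > bt ∨ (total = bt ∧ name < bn) then some (total, name) else some (bt, bn))
    none
  ((best.map (fun p => p.2)).getD "")

-- ===== PRECONDITION & SPEC =====
-- Pre_ excludes the empty table (A's max([]) raises ValueError) and tables containing a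
-- whitespace-only entry: B reads every row's first token and itself raises IndexError on such
-- a blank row, and A also raises IndexError whenever the blank row attains the maximal score.
def Pre_solution (table : List String) (languages : List String) (preference : List Int) : Prop :=
  table ≠ [] ∧ ∀ s ∈ table, PySem.Str.split₀ s ≠ []
instance (table : List String) (languages : List String) (preference : List Int) : Decidable (Pre_solution table languages preference) := by unfold Pre_solution; infer_instance

def pvWitness_solution : List String × List String × List Int :=
  (["java backend junior", "python ml"], ["python", "java"], [5, 2])

def Spec_solution (table : List String) (languages : List String) (preference : List Int) (out : String) : Prop := out = solution_alt table languages preference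
instance (table : List String) (languages : List String) (preference : List Int) (out : String) : Decidable (Spec_solution table languages preference out) := by unfold Spec_solution; infer_instance

-- ===== CLAIM (what is proved, stated in full; the proofs are below) =====
def Claim_equal_solution : Prop := ∀ (table : List String) (languages : List String) (preference : List Int), Dom_solution table languages preference → Pre_solution table languages preference → Spec_solution table languages preference (solution table languages preference)

-- ===== LEMMAS AND PROOFS =====

-- A's per-row scoring loop, abstracted over its free parts
def pvScore (languages : List String) (preference : List Int) (n : Int) (row : List String) : Int :=
  (languages.zip preference).foldl
    (fun tot lp =>
      if lp.1 ∈ row then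
        tot + lp.2 * (n - (((PySem.List.index? row lp.1).getD 0 : Nat) : Int))
      else tot) 0

-- B's per-row scoring scan, abstracted over its free parts
def pvScoreB (pref_sum : PySem.Dict String Int) (n : Int) (row : List String) : Int :=
  ((PySem.List.enumerate row 0).foldl
    (fun (st : PySem.Set String × Int) p =>
      if p.2 ∈ st.1 then st
      else (PySem.Set.add st.1 p.2, st.2 + pref_sum.getD p.2 0 * (n - p.1)))
    (PySem.Set.ofList ([] : List String), 0)).2

-- the first-occurrence weight A effectively gives to each language
def pvW (n : Int) (row : List String) (tok : String) : Int :=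
  if tok ∈ row then n - (((PySem.List.index? row tok).getD 0 : Nat) : Int) else 0

-- the preference dict B builds
def pvPref (languages : List String) (preference : List Int) : PySem.Dict String Int :=
  (languages.zip preference).foldl
    (fun d lp => d.insert lp.1 (d.getD lp.1 0 + lp.2)) (PySem.Dict.empty : PySem.Dict String Int)

-- the tokens of suf whose first occurrence in pre ++ suf lies in suf, in order
def pvNew (pre : List String) : List String → List String
  | [] => []
  | t :: ts => if t ∈ pre then pvNew (pre ++ [t]) ts else t :: pvNew (pre ++ [t]) ts

-- recursive description of B's seen-set scan
def pvRest (d : PySem.Dict String Int) (n : Int) (pre : List String) (k : Int) : List String → Int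
  | [] => 0
  | t :: ts => if t ∈ pre then pvRest d n (pre ++ [t]) (k + 1) ts
               else d.getD t 0 * (n - k) + pvRest d n (pre ++ [t]) (k + 1) ts

lemma pv_score_nil (languages : List String) (preference : List Int) (n : Int) :
    pvScore languages preference n [] = 0 := by
  unfold pvScore
  generalize languages.zip preference = l
  induction l with
  | nil => rfl
  | cons x t _ => simp

lemma pv_headD {α : Type} (l : List α) (d : α) : l.headD d = l.getD 0 d := by
  cases l <;> rfl

-- A's score loop is rows.map (pvScore …)
lemma pv_score_eq (languages : List String) (preference : List Int) (n : Int)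
    (rows : List (List String)) :
    (PySem.List.pyRange 0 (rows.length : Int) 1).foldl
      (fun sc i => sc ++ [pvScore languages preference n (PySem.List.pyGetD rows i [])]) []
    = rows.map (pvScore languages preference n) := by
  have h := PySem.List.foldl_pyRange_zero_pyGetD' rows []
    (fun sc row => sc ++ [pvScore languages preference n row]) []
  exact h.trans (by simpa using
    PySem.List.foldl_append_singleton_eq_map (pvScore languages preference n) rows [])

-- A's job loop is a filter-then-map
lemma pv_job_eq (g : List String → Int) (hg : g [] = 0) (M : Int)
    (rows : List (List String)) :
    (PySem.List.pyRange 0 ((rows.map g).length : Int) 1).foldl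
      (fun j i =>
        if PySem.List.pyGetD (rows.map g) i 0 = M then
          j ++ [(PySem.List.pyGetD rows i []).getD 0 ""]
        else j) []
    = (rows.filter (fun r => decide (g r = M))).map (fun r => r.getD 0 "") := by
  have h1 : ∀ i : Int, PySem.List.pyGetD (rows.map g) i 0 = g (PySem.List.pyGetD rows i []) := by
    intro i
    have h := PySem.List.pyGetD_map g rows i []
    rwa [hg] at h
  simp only [h1, List.length_map]
  have h2 := PySem.List.foldl_pyRange_zero_pyGetD' rows []
    (fun j row => if g row = M then j ++ [row.getD 0 ""] else j) []
  refine h2.trans ?_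
  have h3 := PySem.List.foldl_append_if (fun r => decide (g r = M)) (fun r => r.getD 0 "") rows []
  simp only [decide_eq_true_eq] at h3
  simpa using h3

-- ===== scoring equivalence: pvScore = pvScoreB (pvPref …) =====

-- A's scoring fold as a sum of weighted preferences
lemma pv_score_sum (n : Int) (row : List String) :
    ∀ (l : List (String × Int)) (tot : Int),
    l.foldl (fun tot lp =>
        if lp.1 ∈ row then
          tot + lp.2 * (n - (((PySem.List.index? row lp.1).getD 0 : Nat) : Int))
        else tot) tot
    = tot + (l.map (fun lp => lp.2 * pvW n row lp.1)).sum := by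
  intro l
  induction l with
  | nil => intro tot; simp
  | cons p t ih =>
    intro tot
    by_cases h : p.1 ∈ row
    · simp only [List.foldl_cons, if_pos h, ih, List.map_cons, List.sum_cons, pvW, if_pos h]
      ring
    · simp only [List.foldl_cons, if_neg h, ih, List.map_cons, List.sum_cons, pvW, if_neg h]
      ring

-- one insert changes the D-sum at one (nodup) key
lemma pv_sum_getD_insert (w : String → Int) :
    ∀ (D : List String), D.Nodup → ∀ (d : PySem.Dict String Int) (k : String) (v : Int),
    (D.map (fun tok => (d.insert k v).getD tok 0 * w tok)).sum
    = (D.map (fun tok => d.getD tok 0 * w tok)).sum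
      + (if k ∈ D then (v - d.getD k 0) * w k else 0) := by
  intro D
  induction D with
  | nil => intro _ d k v; simp
  | cons x D' ih =>
    intro hnd d k v
    obtain ⟨hx, hD'⟩ := List.nodup_cons.mp hnd
    rw [List.map_cons, List.map_cons, List.sum_cons, List.sum_cons, ih hD' d k v]
    by_cases hxk : x = k
    · subst hxk
      rw [PySem.Dict.getD_insert_self, if_neg hx, if_pos List.mem_cons_self]
      ring
    · rw [PySem.Dict.getD_insert_of_ne d v 0 hxk]
      by_cases hk : k ∈ D'
      · rw [if_pos hk, if_pos (List.mem_cons_of_mem _ hk)]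
        ring
      · rw [if_neg hk, if_neg (fun hc => by
          rcases List.mem_cons.mp hc with hc | hc
          · exact hxk hc.symm
          · exact hk hc)]
        ring

-- the D-sum of the built dict collects the zip sum, for weights vanishing off D
lemma pv_middle (w : String → Int) (D : List String) (hD : D.Nodup)
    (hw : ∀ tok, tok ∉ D → w tok = 0) :
    ∀ (l : List (String × Int)) (d : PySem.Dict String Int),
    (D.map (fun tok =>
        (l.foldl (fun d lp => d.insert lp.1 (d.getD lp.1 0 + lp.2)) d).getD tok 0 * w tok)).sum
    = (D.map (fun tok => d.getD tok 0 * w tok)).sum + (l.map (fun lp => lp.2 * w lp.1)).sum := by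
  intro l
  induction l with
  | nil => intro d; simp
  | cons p t ih =>
    intro d
    simp only [List.foldl_cons, ih, List.map_cons, List.sum_cons]
    rw [pv_sum_getD_insert w D hD]
    have hval : (if p.1 ∈ D then (d.getD p.1 0 + p.2 - d.getD p.1 0) * w p.1 else 0)
        = p.2 * w p.1 := by
      split_ifs with h
      · ring
      · rw [hw p.1 h]; ring
    rw [hval]; ring

lemma pv_mem_pvNew : ∀ (suf pre : List String) (x : String),
    x ∈ pvNew pre suf ↔ x ∈ suf ∧ x ∉ pre := by
  intro suf
  induction suf with
  | nil => intro pre x; simp [pvNew]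
  | cons t ts ih =>
    intro pre x
    by_cases h : t ∈ pre
    · rw [pvNew, if_pos h, ih]
      simp only [List.mem_append, List.mem_cons, List.not_mem_nil, or_false, not_or]
      constructor
      · rintro ⟨hx, hnp, hnt⟩
        exact ⟨Or.inr hx, hnp⟩
      · rintro ⟨hx, hnp⟩
        rcases hx with rfl | hx
        · exact absurd h hnp
        · exact ⟨hx, hnp, fun hxt => hnp (by rw [hxt]; exact h)⟩
    · rw [pvNew, if_neg h]
      simp only [List.mem_cons, ih, List.mem_append, List.not_mem_nil, or_false, not_or]
      constructor
      · rintro (rfl | ⟨hx, hnp, hnt⟩)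
        · exact ⟨Or.inl rfl, h⟩
        · exact ⟨Or.inr hx, hnp⟩
      · rintro ⟨hx, hnp⟩
        rcases hx with rfl | hx
        · exact Or.inl rfl
        · by_cases hxt : x = t
          · exact Or.inl hxt
          · exact Or.inr ⟨hx, hnp, hxt⟩

lemma pv_nodup_pvNew : ∀ (suf pre : List String), (pvNew pre suf).Nodup := by
  intro suf
  induction suf with
  | nil => intro pre; simp [pvNew]
  | cons t ts ih =>
    intro pre
    by_cases h : t ∈ pre
    · simpa [pvNew, if_pos h] using ih (pre ++ [t])
    · rw [pvNew, if_neg h]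
      refine List.nodup_cons.mpr ⟨?_, ih (pre ++ [t])⟩
      intro hc
      exact ((pv_mem_pvNew ts (pre ++ [t]) t).mp hc).2 (by simp)

-- B's fold equals pvRest
lemma pv_fold_rest (d : PySem.Dict String Int) (n : Int) :
    ∀ (suf : List String) (S : PySem.Set String) (pre : List String) (tot k : Int),
    (∀ tok, tok ∈ S ↔ tok ∈ pre) →
    ((PySem.List.enumerate suf k).foldl
      (fun (st : PySem.Set String × Int) p =>
        if p.2 ∈ st.1 then st
        else (PySem.Set.add st.1 p.2, st.2 + d.getD p.2 0 * (n - p.1)))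
      (S, tot)).2
    = tot + pvRest d n pre k suf := by
  intro suf
  induction suf with
  | nil => intro S pre tot k _; simp [pvRest, PySem.List.enumerate_nil]
  | cons t ts ih =>
    intro S pre tot k hS
    rw [PySem.List.enumerate_cons]
    by_cases h : t ∈ pre
    · have hS' : t ∈ S := (hS t).mpr h
      simp only [List.foldl_cons, if_pos hS']
      rw [ih S (pre ++ [t]) tot (k + 1)
        (fun tok => by rw [hS tok]; simp [List.mem_append]; intro h'; exact h' ▸ h)]
      simp [pvRest, if_pos h]
    · have hS' : t ∉ S := fun hc => h ((hS t).mp hc)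
      simp only [List.foldl_cons, if_neg hS']
      rw [ih (PySem.Set.add S t) (pre ++ [t]) (tot + d.getD t 0 * (n - k)) (k + 1)
        (fun tok => by rw [PySem.Set.mem_add]; simp [hS tok, List.mem_append])]
      simp [pvRest, if_neg h]; ring

-- pvRest is the pvNew sum of first-occurrence weights
lemma pv_rest_eq (d : PySem.Dict String Int) (n : Int) (row : List String) :
    ∀ (suf pre : List String), row = pre ++ suf →
    pvRest d n pre (pre.length : Int) suf
    = ((pvNew pre suf).map (fun tok =>
        d.getD tok 0 * (n - (((PySem.List.index? row tok).getD 0 : Nat) : Int)))).sum := by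
  intro suf
  induction suf with
  | nil => intro pre _; simp [pvRest, pvNew]
  | cons t ts ih =>
    intro pre hrow
    have hlen : ((pre ++ [t]).length : Int) = (pre.length : Int) + 1 := by
      simp
    have hrow' : row = (pre ++ [t]) ++ ts := by simpa [List.append_assoc] using hrow
    by_cases h : t ∈ pre
    · simp only [pvRest, if_pos h, pvNew, if_pos h]
      rw [← hlen, ih (pre ++ [t]) hrow']
    · have hidx : PySem.List.index? row t = some pre.length := by
        rw [PySem.List.index?_eq_some_iff]
        exact ⟨pre, ts, hrow, rfl, h⟩
      simp only [pvRest, if_neg h, pvNew, if_neg h, List.map_cons, List.sum_cons, hidx]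
      rw [← hlen, ih (pre ++ [t]) hrow']
      simp

-- the scoring equivalence
lemma pv_score_eq_scoreB (languages : List String) (preference : List Int) (n : Int)
    (row : List String) :
    pvScore languages preference n row = pvScoreB (pvPref languages preference) n row := by
  have hA : pvScore languages preference n row
      = ((languages.zip preference).map (fun lp => lp.2 * pvW n row lp.1)).sum := by
    unfold pvScore
    simpa using pv_score_sum n row (languages.zip preference) 0
  have h0 : pvRest (pvPref languages preference) n [] 0 row
      = ((pvNew [] row).map (fun tok =>
          (pvPref languages preference).getD tok 0
            * (n - (((PySem.List.index? row tok).getD 0 : Nat) : Int)))).sum := by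
    simpa using pv_rest_eq (pvPref languages preference) n row row [] (by simp)
  have hB : pvScoreB (pvPref languages preference) n row
      = ((pvNew [] row).map (fun tok =>
          (pvPref languages preference).getD tok 0
            * (n - (((PySem.List.index? row tok).getD 0 : Nat) : Int)))).sum := by
    unfold pvScoreB
    rw [pv_fold_rest (pvPref languages preference) n row (PySem.Set.ofList []) [] 0 0
      (fun tok => by simp [PySem.Set.ofList])]
    rw [h0]; ring
  have hcongr : ((pvNew [] row).map (fun tok =>
        (pvPref languages preference).getD tok 0
          * (n - (((PySem.List.index? row tok).getD 0 : Nat) : Int)))).sum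
      = ((pvNew [] row).map (fun tok =>
        (pvPref languages preference).getD tok 0 * pvW n row tok)).sum := by
    refine congrArg List.sum (List.map_congr_left ?_)
    intro tok htok
    unfold pvW
    rw [if_pos ((pv_mem_pvNew row [] tok).mp htok).1]
  have hmid := pv_middle (pvW n row) (pvNew [] row) (pv_nodup_pvNew row [])
    (fun tok htok => by
      unfold pvW
      rw [if_neg (fun hc => htok ((pv_mem_pvNew row [] tok).mpr ⟨hc, by simp⟩))])
    (languages.zip preference) PySem.Dict.empty
  have hempty : ((pvNew [] row).map (fun tok =>
      (PySem.Dict.empty : PySem.Dict String Int).getD tok 0 * pvW n row tok)).sum = 0 := by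
    simp [PySem.Dict.getD, PySem.Dict.get?, PySem.Dict.empty]
  rw [hA, hB, hcongr]
  unfold pvPref
  rw [hmid, hempty]
  ring

-- "p is at least as good as q" under the selection rule
def pvBetter (p q : Int × String) : Prop := q.1 < p.1 ∨ (p.1 = q.1 ∧ p.2 ≤ q.2)

lemma pvBetter_refl (p : Int × String) : pvBetter p p := Or.inr ⟨rfl, le_refl _⟩

lemma pvBetter_trans {p q r : Int × String} (h1 : pvBetter p q) (h2 : pvBetter q r) :
    pvBetter p r := by
  rcases h1 with h1 | ⟨h1a, h1b⟩ <;> rcases h2 with h2 | ⟨h2a, h2b⟩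
  · exact Or.inl (lt_trans h2 h1)
  · exact Or.inl (h2a ▸ h1)
  · exact Or.inl (h1a ▸ h2)
  · exact Or.inr ⟨h1a.trans h2a, le_trans h1b h2b⟩

-- B's one-pass fold returns one of the scanned pairs (or the seed), at least as good as all
lemma pv_foldl_best (g : List String → Int) :
    ∀ (l : List (List String)) (b : Int × String),
    ∃ c, l.foldl (fun best row => match best with
        | none => some (g row, row.getD 0 "")
        | some (bt, bn) =>
            if g row > bt ∨ (g row = bt ∧ row.getD 0 "" < bn) then
              some (g row, row.getD 0 "")
            else some (bt, bn))
      (some b) = some c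
      ∧ (c = b ∨ ∃ r ∈ l, c = (g r, r.getD 0 ""))
      ∧ pvBetter c b
      ∧ ∀ x ∈ l, pvBetter c (g x, x.getD 0 "") := by
  intro l
  induction l with
  | nil => intro b; exact ⟨b, rfl, Or.inl rfl, pvBetter_refl b, by simp⟩
  | cons x t ih =>
    intro b
    obtain ⟨bt, bn⟩ := b
    by_cases hx : g x > bt ∨ (g x = bt ∧ x.getD 0 "" < bn)
    · obtain ⟨c, hfold, hmem, hb, hall⟩ := ih (g x, x.getD 0 "")
      refine ⟨c, ?_, ?_, ?_, ?_⟩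
      · show List.foldl _ (if g x > bt ∨ (g x = bt ∧ x.getD 0 "" < bn) then
            some (g x, x.getD 0 "") else some (bt, bn)) t = some c
        rw [if_pos hx]; exact hfold
      · rcases hmem with rfl | ⟨r, hr, rfl⟩
        · exact Or.inr ⟨x, List.mem_cons_self, rfl⟩
        · exact Or.inr ⟨r, List.mem_cons_of_mem _ hr, rfl⟩
      · refine pvBetter_trans hb ?_
        rcases hx with hx | ⟨hx1, hx2⟩
        · exact Or.inl hx
        · exact Or.inr ⟨hx1, le_of_lt hx2⟩
      · intro y hy
        rcases List.mem_cons.mp hy with rfl | hy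
        · exact hb
        · exact hall y hy
    · obtain ⟨c, hfold, hmem, hb, hall⟩ := ih (bt, bn)
      refine ⟨c, ?_, ?_, hb, ?_⟩
      · show List.foldl _ (if g x > bt ∨ (g x = bt ∧ x.getD 0 "" < bn) then
            some (g x, x.getD 0 "") else some (bt, bn)) t = some c
        rw [if_neg hx]; exact hfold
      · rcases hmem with rfl | ⟨r, hr, rfl⟩
        · exact Or.inl rfl
        · exact Or.inr ⟨r, List.mem_cons_of_mem _ hr, rfl⟩
      · intro y hy
        rcases List.mem_cons.mp hy with rfl | hy
        · have h1 : g y ≤ bt := le_of_not_gt (fun hgt => hx (Or.inl hgt))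
          have h2 : g y = bt → bn ≤ y.getD 0 "" :=
            fun he => le_of_not_gt (fun hlt => hx (Or.inr ⟨he, hlt⟩))
          refine pvBetter_trans hb ?_
          rcases lt_or_eq_of_le h1 with h | h
          · exact Or.inl h
          · exact Or.inr ⟨h.symm, h2 h⟩
        · exact hall y hy

-- head of the sorted names of the maximal-score rows = result of the one-pass best fold
lemma pv_core (g : List String → Int) (rows : List (List String)) (hne : rows ≠ []) :
    (PySem.List.sorted
        ((rows.filter
            (fun r => decide (g r = (PySem.List.max? (rows.map g) (fun x => x)).getD 0))).map
          (fun r => r.getD 0 ""))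
        (fun x => x) false).getD 0 ""
    = ((rows.foldl (fun best row => match best with
        | none => some (g row, row.getD 0 "")
        | some (bt, bn) =>
            if g row > bt ∨ (g row = bt ∧ row.getD 0 "" < bn) then
              some (g row, row.getD 0 "")
            else some (bt, bn))
        none).map (fun p => p.2)).getD "" := by
  obtain ⟨r0, rest, rfl⟩ : ∃ r0 rest, rows = r0 :: rest := by
    cases rows with
    | nil => exact absurd rfl hne
    | cons a t => exact ⟨a, t, rfl⟩
  obtain ⟨c, hfold, hmem, hb, hall⟩ := pv_foldl_best g rest (g r0, r0.getD 0 "")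
  have hfold' : (r0 :: rest).foldl (fun best row => match best with
      | none => some (g row, row.getD 0 "")
      | some (bt, bn) =>
          if g row > bt ∨ (g row = bt ∧ row.getD 0 "" < bn) then
            some (g row, row.getD 0 "")
          else some (bt, bn))
      none = some c := by
    simpa using hfold
  rw [hfold']
  have hcmem : ∃ r ∈ r0 :: rest, c = (g r, r.getD 0 "") := by
    rcases hmem with rfl | ⟨r, hr, rfl⟩
    · exact ⟨r0, List.mem_cons_self, rfl⟩
    · exact ⟨r, List.mem_cons_of_mem _ hr, rfl⟩
  have hcall : ∀ x ∈ r0 :: rest, pvBetter c (g x, x.getD 0 "") := by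
    intro y hy
    rcases List.mem_cons.mp hy with rfl | hy
    · exact hb
    · exact hall y hy
  set M := (PySem.List.max? ((r0 :: rest).map g) (fun x => x)).getD 0 with hMdef
  obtain ⟨m, hm⟩ : ∃ m, PySem.List.max? ((r0 :: rest).map g) (fun x => x) = some m := by
    cases h : PySem.List.max? ((r0 :: rest).map g) (fun x => x) with
    | none => simp [PySem.List.max?_eq_none_iff] at h
    | some m => exact ⟨m, rfl⟩
  have hMm : M = m := by rw [hMdef, hm]; rfl
  have hmle : ∀ x ∈ r0 :: rest, g x ≤ m := by
    intro x hx
    exact PySem.List.max?_isMax hm (g x) (List.mem_map_of_mem hx)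
  obtain ⟨x0, hx0, hx0e⟩ : ∃ x ∈ r0 :: rest, g x = m := by
    obtain ⟨x, hx, hxe⟩ := List.mem_map.mp (PySem.List.max?_mem hm)
    exact ⟨x, hx, hxe⟩
  have hc1 : c.1 = M := by
    obtain ⟨rc, hrc, hce⟩ := hcmem
    have h1 : c.1 ≤ m := by rw [hce]; exact hmle rc hrc
    have h2 : m ≤ c.1 := by
      rcases hcall x0 hx0 with h | ⟨h, _⟩
      · exact le_of_lt (hx0e ▸ h)
      · have h' : c.1 = g x0 := h
        exact le_of_eq (h'.trans hx0e).symm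
    rw [hMm]
    exact le_antisymm h1 h2
  set job := ((r0 :: rest).filter (fun r => decide (g r = M))).map (fun r => r.getD 0 "")
    with hjobdef
  have hc2job : c.2 ∈ job := by
    obtain ⟨rc, hrc, hce⟩ := hcmem
    refine List.mem_map.mpr ⟨rc, List.mem_filter.mpr ⟨hrc, ?_⟩, by rw [hce]⟩
    have : g rc = c.1 := by rw [hce]
    simp [this, hc1]
  cases hs : PySem.List.sorted job (fun x => x) false with
  | nil =>
    rw [PySem.List.sorted_eq_nil_iff] at hs
    exact absurd hs (List.ne_nil_of_mem hc2job)
  | cons h t =>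
    have hhmem : h ∈ job := (PySem.List.mem_sorted job _ false h).mp (hs ▸ List.mem_cons_self)
    have hmin : ∀ y ∈ job, h ≤ y := PySem.List.key_head_sorted_le job (fun x => x) hs
    obtain ⟨xh, hxh, hxhe⟩ := List.mem_map.mp hhmem
    have hxM : g xh = M := by
      have := (List.mem_filter.mp hxh).2
      simpa using this
    have hch : c.2 ≤ h := by
      rcases hcall xh (List.mem_filter.mp hxh).1 with hlt | ⟨_, hle⟩
      · exact absurd hlt (by simp [hxM, hc1])
      · rw [← hxhe]; exact hle
    have hhc : h ≤ c.2 := hmin c.2 hc2job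
    simp [le_antisymm hhc hch]

-- ===== VERDICT (by name: the statement is the Claim_ definition above) =====

theorem solution_spec : Claim_equal_solution := by
  intro table languages preference _hdom hpre
  obtain ⟨hne, _hrows⟩ := hpre
  have hrne : table.map PySem.Str.split₀ ≠ [] := by simpa using hne
  unfold Spec_solution
  have htbl : (PySem.List.pyRange 0 (table.length : Int) 1).map
      (fun t => PySem.Str.split₀ (PySem.List.pyGetD table t "")) = table.map PySem.Str.split₀ := by
    conv_rhs => rw [← PySem.List.map_pyGetD_pyRange_zero' table ""]
    rw [List.map_map]; rfl
  simp only [solution, solution_alt, htbl, PySem.List.pyGetD_zero, pv_headD]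
  simp only [← pvScore.eq_def, ← pvScoreB.eq_def, ← pvPref.eq_def]
  simp only [pv_score_eq]
  simp only [pv_job_eq _ (pv_score_nil languages preference
    (((List.map PySem.Str.split₀ table).getD 0 []).length : Int))]
  have hgf : ∀ m : Int, pvScore languages preference m
      = pvScoreB (pvPref languages preference) m :=
    fun m => funext (fun r => pv_score_eq_scoreB languages preference m r)
  rw [hgf]
  exact pv_core _ (table.map PySem.Str.split₀) hrne
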